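-- pv_equiv track=rewrite | github.com/NadiaAB-source/vlm-driving-safety | metrics.py | error_analysis
-- ===== SOURCE A (Python) =====
-- def error_analysis(results):
--     total = len(results)
--
--     n_ctx = sum(1 for r in results if not r.get('context_ok', True))
--
--     n_rule = sum(
--         1 for r in results
--         if r.get('context_ok', True)
--         and r.get('any_override', False)
--         and r.get('baseline_correct', False)
--         and not r.get('safe_correct', False)
--     )
--
--     n_ambig = sum(
--         1 for r in results
--         if r.get('context_ok', True)
--         and not r.get('baseline_consistent', True)
--         and not (
--             r.get('any_override', False)
--             and r.get('baseline_correct', False)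
--             and not r.get('safe_correct', False)
--         )
--     )
--
--     return {
--         "context_errors": n_ctx,
--         "rule_conflicts": n_rule,
--         "ambiguous": n_ambig,
--         "total": total
--     }
-- ===== SOURCE B (Python) =====
-- def error_analysis(results):
--     n_ctx = n_rule = n_ambig = 0
--     for r in results:
--         context_ok = r.get('context_ok', True)
--         rule = (r.get('any_override', False)
--                 and r.get('baseline_correct', False)
--                 and not r.get('safe_correct', False))
--         if not context_ok:
--             n_ctx += 1
--         elif rule:
--             n_rule += 1
--         elif not r.get('baseline_consistent', True):
--             n_ambig += 1
--     return {
--         "context_errors": n_ctx,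
--         "rule_conflicts": n_rule,
--         "ambiguous": n_ambig,
--         "total": len(results)
--     }
-- ===== Notes on version B (the rewrite author's own statement) =====
-- stated objective: simpler
-- what changed: Replaces the three separate filtering passes (each re-evaluating the shared rule-conflict subexpression via repeated dict lookups) with a single loop over results that classifies each record once through an if/elif chain into one of three counters.
import Mathlib
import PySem

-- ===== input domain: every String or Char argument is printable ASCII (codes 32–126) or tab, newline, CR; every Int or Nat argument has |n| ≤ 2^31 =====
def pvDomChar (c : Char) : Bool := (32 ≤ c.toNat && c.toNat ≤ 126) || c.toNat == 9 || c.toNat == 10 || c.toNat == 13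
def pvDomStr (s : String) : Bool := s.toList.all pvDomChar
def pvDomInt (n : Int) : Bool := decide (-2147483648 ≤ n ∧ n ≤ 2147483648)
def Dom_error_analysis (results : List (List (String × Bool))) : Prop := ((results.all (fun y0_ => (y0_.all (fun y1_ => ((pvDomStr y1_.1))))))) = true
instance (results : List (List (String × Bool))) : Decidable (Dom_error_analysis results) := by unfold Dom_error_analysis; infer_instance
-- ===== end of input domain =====

-- B folds A's three filtering passes into one classifying loop over the records
-- (objective: simpler — each record is read once and lands in exactly one counter).

-- Python dict.get(k, d) on the association-list representation: first match, else default.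
def pvGet (r : List (String × Bool)) (k : String) (d : Bool) : Bool :=
  match r.find? (fun p => p.1 == k) with
  | some p => p.2
  | none => d

-- ===== PORT A =====
def error_analysis (results : List (List (String × Bool))) : List (String × Int) :=
  let total : Int := PySem.List.len results
  let n_ctx : Int := results.foldl
    (fun acc r => if !(pvGet r "context_ok" true) then acc + 1 else acc) 0
  let n_rule : Int := results.foldl
    (fun acc r => if pvGet r "context_ok" true
        && pvGet r "any_override" false
        && pvGet r "baseline_correct" false
        && !(pvGet r "safe_correct" false) then acc + 1 else acc) 0
  let n_ambig : Int := results.foldl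
    (fun acc r => if pvGet r "context_ok" true
        && !(pvGet r "baseline_consistent" true)
        && !(pvGet r "any_override" false
             && pvGet r "baseline_correct" false
             && !(pvGet r "safe_correct" false)) then acc + 1 else acc) 0
  [("context_errors", n_ctx), ("rule_conflicts", n_rule),
   ("ambiguous", n_ambig), ("total", total)]

-- ===== PORT B =====
def errLoop : List (List (String × Bool)) → Int × Int × Int → Int × Int × Int
  | [], acc => acc
  | r :: rest, (nc, nr, na) =>
    let context_ok := pvGet r "context_ok" true
    let rule := pvGet r "any_override" false
        && pvGet r "baseline_correct" false
        && !(pvGet r "safe_correct" false)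
    if !context_ok then errLoop rest (nc + 1, nr, na)
    else if rule then errLoop rest (nc, nr + 1, na)
    else if !(pvGet r "baseline_consistent" true) then errLoop rest (nc, nr, na + 1)
    else errLoop rest (nc, nr, na)

def error_analysis_alt (results : List (List (String × Bool))) : List (String × Int) :=
  let (nc, nr, na) := errLoop results (0, 0, 0)
  [("context_errors", nc), ("rule_conflicts", nr),
   ("ambiguous", na), ("total", PySem.List.len results)]

-- ===== PRECONDITION & SPEC =====
def Spec_error_analysis (results : List (List (String × Bool))) (out : List (String × Int)) : Prop := out = error_analysis_alt results
instance (results : List (List (String × Bool))) (out : List (String × Int)) : Decidable (Spec_error_analysis results out) := by unfold Spec_error_analysis; infer_instance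

-- ===== CLAIM (what is proved, stated in full; the proofs are below) =====
def Claim_equal_error_analysis : Prop := ∀ (results : List (List (String × Bool))), Dom_error_analysis results → Spec_error_analysis results (error_analysis results)

-- ===== LEMMAS AND PROOFS =====

-- predicates of A's three passes
def pCtx (r : List (String × Bool)) : Bool := !(pvGet r "context_ok" true)
def pRule (r : List (String × Bool)) : Bool :=
  pvGet r "context_ok" true && pvGet r "any_override" false
    && pvGet r "baseline_correct" false && !(pvGet r "safe_correct" false)
def pAmbig (r : List (String × Bool)) : Bool :=
  pvGet r "context_ok" true && !(pvGet r "baseline_consistent" true)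
    && !(pvGet r "any_override" false && pvGet r "baseline_correct" false
         && !(pvGet r "safe_correct" false))

theorem errLoop_counts (results : List (List (String × Bool))) (nc nr na : Int) :
    errLoop results (nc, nr, na) =
      (nc + results.countP pCtx, nr + results.countP pRule, na + results.countP pAmbig) := by
  induction results generalizing nc nr na with
  | nil => simp [errLoop]
  | cons r rest ih =>
    simp only [errLoop, List.countP_cons, pCtx, pRule, pAmbig]
    by_cases hco : pvGet r "context_ok" true <;>
      by_cases hrl : (pvGet r "any_override" false && pvGet r "baseline_correct" false
          && !(pvGet r "safe_correct" false)) = true <;>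
      by_cases hbc : pvGet r "baseline_consistent" true <;>
      simp [hco, hrl, hbc, ih] <;> omega

-- ===== VERDICT (by name: the statement is the Claim_ definition above) =====
theorem error_analysis_spec : Claim_equal_error_analysis := by
  intro results _
  unfold Spec_error_analysis error_analysis error_analysis_alt
  rw [errLoop_counts]
  rw [PySem.List.foldl_count_if (fun r => !(pvGet r "context_ok" true)) results 0,
      PySem.List.foldl_count_if (fun r => pvGet r "context_ok" true
        && pvGet r "any_override" false
        && pvGet r "baseline_correct" false
        && !(pvGet r "safe_correct" false)) results 0,
      PySem.List.foldl_count_if (fun r => pvGet r "context_ok" true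
        && !(pvGet r "baseline_consistent" true)
        && !(pvGet r "any_override" false
             && pvGet r "baseline_correct" false
             && !(pvGet r "safe_correct" false))) results 0]
  simp
  refine ⟨List.countP_congr fun r _ => ?_, List.countP_congr fun r _ => ?_,
    List.countP_congr fun r _ => ?_⟩ <;> simp [pCtx, pRule, pAmbig]
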